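-- pv_equiv track=rewrite | github.com/omegaup/ofmi-archive | 2022/dia-1/ofmi-2022-chemsificacion/case-generator.py | allFinalVowels
-- ===== SOURCE A (Python) =====
-- vowels = ["a", "e", "i", "o", "u"]
--
-- def allFinalVowels(word):
--     n = 3
--     for i in range(0, len(word), n):
--         w = word[i: i + n]
--         if w[-1] not in vowels:
--             return False
--         if len(w) == 1:
--             return True
--         if w[-2] in vowels:
--             return False
--
--     return True
-- ===== SOURCE B (Python) =====
-- vowels = ["a", "e", "i", "o", "u"]
--
-- def allFinalVowels(word):
--     n = len(word)
--
--     def ok(i, c):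
--         v = c in vowels
--         if i == n - 1:
--             return v
--         if i == n - 2 and n % 3 == 2:
--             return not v
--         r = i % 3
--         if r == 2:
--             return v
--         if r == 1:
--             return not v
--         return True
--
--     return all(ok(i, c) for i, c in enumerate(word))
-- ===== Notes on version B (the rewrite author's own statement) =====
-- stated objective: alternative
-- what changed: Replaced A's step-by-3 slicing loop with early returns by a single per-character pass that checks each character against a rule derived from its index mod 3 and the word length (last char must be a vowel; second-to-last non-vowel when len%3==2; otherwise index%3==2 vowel, index%3==1 non-vowel).
import Mathlib
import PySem

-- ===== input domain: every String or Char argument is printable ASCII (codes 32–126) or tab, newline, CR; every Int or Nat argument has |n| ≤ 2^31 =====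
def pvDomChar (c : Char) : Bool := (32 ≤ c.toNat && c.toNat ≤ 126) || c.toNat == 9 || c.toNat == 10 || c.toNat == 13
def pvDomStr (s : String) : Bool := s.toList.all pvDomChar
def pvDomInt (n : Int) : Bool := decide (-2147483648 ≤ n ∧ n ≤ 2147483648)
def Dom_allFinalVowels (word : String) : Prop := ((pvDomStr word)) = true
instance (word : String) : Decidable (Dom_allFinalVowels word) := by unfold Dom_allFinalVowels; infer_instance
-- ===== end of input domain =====

-- B replaces A's step-3 slicing loop by a single per-character pass keyed on index mod 3
-- and the word's length mod 3 (objective: alternative decomposition, same cost).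

-- ===== PORT A =====
-- vowels = ["a", "e", "i", "o", "u"]  (char-level, words iterated as lists of chars)
def pvVowels : List Char := ['a', 'e', 'i', 'o', 'u']

-- the for-loop of A over range(0, len(word), 3), with its early returns
def pvALoop (cs : List Char) : List Int → Bool
  | [] => true
  | i :: rest =>
    let w := PySem.List.slice cs (some i) (some (i + 3))
    match PySem.List.pyGet? w (-1) with
    | none => false            -- IndexError branch; unreachable: i is a valid start index
    | some last =>
      if ¬ (last ∈ pvVowels) then false
      else if w.length = 1 then true
      else
        match PySem.List.pyGet? w (-2) with
        | none => false        -- unreachable likewise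
        | some sec =>
          if sec ∈ pvVowels then false
          else pvALoop cs rest

def allFinalVowels (word : String) : Bool :=
  pvALoop word.toList (PySem.List.pyRange 0 (word.toList.length : Int) 3)

-- ===== PORT B =====
-- per-character check: position i, total length n
def pvOk (n : Int) (p : Int × Char) : Bool :=
  let v : Bool := decide (p.2 ∈ pvVowels)
  if p.1 = n - 1 then v
  else if p.1 = n - 2 ∧ n % 3 = 2 then !v
  else if p.1 % 3 = 2 then v
  else if p.1 % 3 = 1 then !v
  else true

def allFinalVowels_alt (word : String) : Bool :=
  let cs := word.toList
  let n : Int := cs.length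
  (PySem.List.enumerate cs).all (pvOk n)

-- ===== PRECONDITION & SPEC =====
def Spec_allFinalVowels (word : String) (out : Bool) : Prop := out = allFinalVowels_alt word
instance (word : String) (out : Bool) : Decidable (Spec_allFinalVowels word out) := by unfold Spec_allFinalVowels; infer_instance

-- ===== CLAIM (what is proved, stated in full; the proofs are below) =====
def Claim_equal_allFinalVowels : Prop := ∀ (word : String), Dom_allFinalVowels word → Spec_allFinalVowels word (allFinalVowels word)

-- ===== LEMMAS AND PROOFS =====

-- common characterisation: chunks of three, back-checked
def pvSpec : List Char → Bool
  | [] => true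
  | [c] => decide (c ∈ pvVowels)
  | [c, d] => decide (d ∈ pvVowels) && !decide (c ∈ pvVowels)
  | _ :: d :: e :: rest =>
      (decide (e ∈ pvVowels) && !decide (d ∈ pvVowels)) && pvSpec rest

lemma pvRange3_nil (a b : Int) (h : ¬ a < b) : PySem.List.pyRange a b 3 = [] := by
  rw [PySem.List.pyRange_of_pos a b (by norm_num)]
  simp [h]

lemma pvRange3_cons (a b : Int) (h : a < b) :
    PySem.List.pyRange a b 3 = a :: PySem.List.pyRange (a + 3) b 3 := by
  rw [PySem.List.pyRange_of_pos a b (by norm_num),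
      PySem.List.pyRange_of_pos (a + 3) b (by norm_num)]
  rw [if_pos h]
  by_cases h3 : a + 3 < b
  · rw [if_pos h3]
    have hm : ((b - a + 3 - 1) / 3).toNat = ((b - (a + 3) + 3 - 1) / 3).toNat + 1 := by
      omega
    rw [hm, List.range_succ_eq_map]
    simp [List.map_map, Function.comp]
    intro k _
    ring
  · rw [if_neg h3]
    have hm : ((b - a + 3 - 1) / 3).toNat = 1 := by omega
    rw [hm]
    simp

-- A's loop from start index k computes pvSpec of the suffix
lemma pvALoop_spec (m : Nat) : ∀ (cs : List Char) (k : Nat), cs.length ≤ m + k →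
    pvALoop cs (PySem.List.pyRange (k : Int) (cs.length : Int) 3) = pvSpec (cs.drop k) := by
  induction m with
  | zero =>
    intro cs k hk
    have h1 : ¬ ((k : Int) < (cs.length : Int)) := by exact_mod_cast by omega
    rw [pvRange3_nil _ _ h1, List.drop_eq_nil_of_le (by omega)]
    rfl
  | succ m ih =>
    intro cs k hk
    by_cases hlt : k < cs.length
    · have h1 : ((k : Int) < (cs.length : Int)) := by exact_mod_cast hlt
      rw [pvRange3_cons _ _ h1]
      have hsl : PySem.List.slice cs (some (k : Int)) (some ((k : Int) + 3)) =
          (cs.drop k).take 3 := by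
        have := PySem.List.slice_natCast_add cs k 3
        simpa using this
      have hrec : ((k : Int) + 3) = ((k + 3 : Nat) : Int) := by push_cast; ring_nf
      have hih := ih cs (k + 3) (by omega)
      rcases hd : cs.drop k with _ | ⟨c, rest⟩
      · exfalso
        have := congrArg List.length hd
        simp at this; omega
      rcases rest with _ | ⟨d, rest2⟩
      · -- suffix [c]
        simp only [pvALoop, hsl, hd]
        have : cs.length = k + 1 := by
          have := congrArg List.length hd
          simp [List.length_drop] at this; omega
        simp [PySem.List.pyGet?, PySem.List.pyIdx?, pvSpec]
      rcases rest2 with _ | ⟨e, rest3⟩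
      · -- suffix [c, d]
        simp only [pvALoop, hsl, hd]
        have hlen : cs.length = k + 2 := by
          have := congrArg List.length hd
          simp [List.length_drop] at this; omega
        have hnil : PySem.List.pyRange ((k : Int) + 3) (cs.length : Int) 3 = [] := by
          apply pvRange3_nil; omega
        simp [PySem.List.pyGet?, PySem.List.pyIdx?, pvSpec, hnil]
        by_cases hdv : d ∈ pvVowels <;> by_cases hcv : c ∈ pvVowels <;>
          simp [hdv, hcv, pvALoop]
      · -- suffix c :: d :: e :: rest3
        simp only [pvALoop, hsl, hd]
        have hd3 : cs.drop (k + 3) = rest3 := by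
          have : cs.drop (k + 3) = (cs.drop k).drop 3 := by
            rw [List.drop_drop]
          rw [this, hd]; rfl
        rw [hrec] at *
        rw [hih, hd3]
        simp [PySem.List.pyGet?, PySem.List.pyIdx?, pvSpec]
        by_cases hev : e ∈ pvVowels <;> by_cases hdv : d ∈ pvVowels <;>
          simp [hev, hdv]
    · have h1 : ¬ ((k : Int) < (cs.length : Int)) := by exact_mod_cast by omega
      rw [pvRange3_nil _ _ h1, List.drop_eq_nil_of_le (by omega)]
      rfl

-- B's pass over a suffix starting at a multiple-of-3 index computes pvSpec of the suffix
lemma pvBLoop_spec (m : Nat) : ∀ (cs : List Char) (k : Nat), cs.length ≤ m → k % 3 = 0 →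
    (PySem.List.enumerate cs (k : Int)).all (pvOk ((k : Int) + (cs.length : Int))) =
      pvSpec cs := by
  induction m with
  | zero =>
    intro cs k hm _
    have : cs = [] := List.length_eq_zero_iff.mp (by omega)
    subst this
    simp [PySem.List.enumerate_nil, pvSpec]
  | succ m ih =>
    intro cs k hm hk3
    rcases cs with _ | ⟨c, rest⟩
    · simp [PySem.List.enumerate_nil, pvSpec]
    rcases rest with _ | ⟨d, rest2⟩
    · -- [c] : single char at index k = n - 1
      simp only [PySem.List.enumerate_cons, PySem.List.enumerate_nil, List.all_cons,
        List.all_nil, pvSpec]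
      simp [pvOk]
    rcases rest2 with _ | ⟨e, rest3⟩
    · -- [c, d] : n = k + 2, n % 3 = 2
      simp only [PySem.List.enumerate_cons, PySem.List.enumerate_nil, List.all_cons,
        List.all_nil, pvSpec]
      have hne1 : ¬ ((k : Int) = (k : Int) + 2 - 1) := by omega
      have hmod : ((k : Int) + 2) % 3 = 2 := by omega
      have hkm : (k : Int) % 3 = 0 := by omega
      simp only [pvOk]
      have heq1 : ((k : Int)) + 1 = (k : Int) + 2 - 1 := by ring
      simp [hne1, hmod, heq1]
      by_cases hdv : d ∈ pvVowels <;> by_cases hcv : c ∈ pvVowels <;>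
        simp [hdv, hcv, Bool.and_comm]
    · -- c :: d :: e :: rest3
      simp only [PySem.List.enumerate_cons, List.all_cons, pvSpec]
      have hlen : (c :: d :: e :: rest3).length = rest3.length + 3 := by simp
      set n : Int := (k : Int) + ((rest3.length : Int) + 3) with hn
      have hkm : (k : Int) % 3 = 0 := by omega
      have hceq : (k : Int) + ((c :: d :: e :: rest3).length : Int) = n := by
        simp [hn]; ring
      rw [hceq]
      have hrest : (PySem.List.enumerate rest3 ((k : Int) + 1 + 1 + 1)).all (pvOk n) =
          pvSpec rest3 := by
        have h3 : ((k : Int) + 1 + 1 + 1) = ((k + 3 : Nat) : Int) := by push_cast; ring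
        have hn3 : n = ((k + 3 : Nat) : Int) + (rest3.length : Int) := by
          rw [hn]; push_cast; ring
        rw [h3, hn3]
        exact ih rest3 (k + 3) (by simp at hm; omega) (by omega)
      rw [hrest]
      -- the three leading checks
      have hc : pvOk n ((k : Int), c) = true := by
        simp only [pvOk]
        have h1 : ¬ ((k : Int) = n - 1) := by omega
        have h2 : ¬ ((k : Int) = n - 2 ∧ n % 3 = 2) := by
          rintro ⟨h, _⟩; omega
        have h3 : ¬ ((k : Int) % 3 = 2) := by omega
        have h4 : ¬ ((k : Int) % 3 = 1) := by omega
        simp [h1, h2, h3, h4]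
      have hdx : pvOk n ((k : Int) + 1, d) = !decide (d ∈ pvVowels) := by
        simp only [pvOk]
        have h1 : ¬ ((k : Int) + 1 = n - 1) := by omega
        have h2 : ¬ ((k : Int) + 1 = n - 2 ∧ n % 3 = 2) := by
          rintro ⟨h, hm2⟩; omega
        have h4 : (((k : Int) + 1) % 3 = 1) := by omega
        simp [h1, h2, h4]
      have hex : pvOk n ((k : Int) + 1 + 1, e) = decide (e ∈ pvVowels) := by
        simp only [pvOk]
        by_cases h1 : (k : Int) + 1 + 1 = n - 1
        · simp [h1]
        · have h2 : ¬ ((k : Int) + 1 + 1 = n - 2 ∧ n % 3 = 2) := by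
            rintro ⟨h, hm2⟩; omega
          have h3 : (((k : Int) + 1 + 1) % 3 = 2) := by omega
          simp [h1, h2, h3]
      rw [hc, hdx, hex]
      by_cases hev : e ∈ pvVowels <;> by_cases hdv : d ∈ pvVowels <;>
        simp [hev, hdv]

lemma pvA_eq_spec (word : String) : allFinalVowels word = pvSpec word.toList := by
  unfold allFinalVowels
  have := pvALoop_spec word.toList.length word.toList 0 (by omega)
  simpa using this

lemma pvB_eq_spec (word : String) : allFinalVowels_alt word = pvSpec word.toList := by
  unfold allFinalVowels_alt
  have := pvBLoop_spec word.toList.length word.toList 0 (le_refl _) (by omega)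
  simpa using this

-- ===== VERDICT (by name: the statement is the Claim_ definition above) =====
theorem allFinalVowels_spec : Claim_equal_allFinalVowels := by
  intro word _
  unfold Spec_allFinalVowels
  rw [pvA_eq_spec, pvB_eq_spec]
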